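-- pv_equiv track=rewrite | github.com/W25306/Algorithm | GM/solution.py | solution_06
-- ===== SOURCE A (Python) =====
-- def solution_06(n):
--     answer = [[0] * i for i in range(1, n + 1)]
--     x = -1
--     y = 0
--     s = 1
--     for i in range(n):
--         for j in range(i, n):
--             if i % 3 == 0:
--                 x += 1
--             elif i % 3 == 1:
--                 y += 1
--             else:
--                 x -= 1
--                 y -= 1
--             answer[x][y] = s
--             s += 1
--     result = []
--     for ans in answer:
--         result += ans
--     return result
-- ===== SOURCE B (Python) =====
-- def solution_06(n):
--     # Closed form: each cell's value is computed directly from its coordinates.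
--     # Cell (x, y) (row x, 0 <= y <= x) lies on spiral ring r = min(y, n-1-x, x-y);
--     # all cells of inner rings come first (base = T(n) - T(n-3r)), and within the
--     # ring the offset depends on which of the three edges the cell sits on.
--     out = []
--     for x in range(n):
--         for y in range(x + 1):
--             r = min(y, n - 1 - x, x - y)
--             m = n - 3 * r
--             base = n * (n + 1) // 2 - m * (m + 1) // 2
--             if y == r:
--                 off = x - 2 * r + 1
--             elif x == n - 1 - r:
--                 off = m + (y - r)
--             else:
--                 off = 3 * m - 2 - (x - 2 * r)
--             out.append(base + off)
--     return out
-- ===== Notes on version B (the rewrite author's own statement) =====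
-- stated objective: alternative
-- what changed: B abandons the spiral walk entirely: it computes each cell's value directly from its coordinates by a closed form (ring index r = min(y, n-1-x, x-y), triangular-number base, per-edge offset), with no cursor, no direction state and no mutable grid.
import Mathlib
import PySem

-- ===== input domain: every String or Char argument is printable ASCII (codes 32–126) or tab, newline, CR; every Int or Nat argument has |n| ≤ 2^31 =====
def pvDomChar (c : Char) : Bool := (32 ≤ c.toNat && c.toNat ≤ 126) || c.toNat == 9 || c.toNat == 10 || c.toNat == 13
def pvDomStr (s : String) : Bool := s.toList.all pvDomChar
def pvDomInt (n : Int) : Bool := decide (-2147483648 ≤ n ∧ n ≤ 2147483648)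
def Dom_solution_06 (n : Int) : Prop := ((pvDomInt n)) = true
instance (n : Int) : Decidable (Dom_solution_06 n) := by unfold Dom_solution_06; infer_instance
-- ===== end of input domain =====

-- B replaces A's stateful spiral walk over a 2-D grid by a per-cell closed form
-- (ring index, triangular base, per-edge offset); same O(n^2) cost, no mutable state.

-- ===== PORT A =====
-- one iteration of A's inner loop body (i is the outer index; the state is (answer, x, y, s));
-- answer[x][y] = s is ported as read-row / set-in-row / set-row, exact since Python's
-- executions of A only ever index in range (pyGetD/pySetD deviate only where Python raises)
def aInner (i : Int) (st : List (List Int) × Int × Int × Int) :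
    List (List Int) × Int × Int × Int :=
  let (ans, x, y, s) := st
  let (x', y') :=
    if PySem.Int.mod i 3 = 0 then (x + 1, y)
    else if PySem.Int.mod i 3 = 1 then (x, y + 1)
    else (x - 1, y - 1)
  (PySem.List.pySetD ans x' (PySem.List.pySetD (PySem.List.pyGetD ans x' []) y' s), x', y', s + 1)

def solution_06 (n : Int) : List Int :=
  let answer := (PySem.List.pyRange 1 (n + 1) 1).map (fun i => List.replicate i.toNat (0 : Int))
  let st := (PySem.List.pyRange 0 n 1).foldl
    (fun st i => (PySem.List.pyRange i n 1).foldl (fun st _j => aInner i st) st)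
    (answer, -1, 0, 1)
  st.1.foldl (fun r a => r ++ a) []

-- ===== PORT B =====
-- the closed-form value of cell (x, y): ring r = min(y, n-1-x, x-y), base = T(n) - T(n-3r),
-- offset by which of the three ring edges the cell lies on (Source B's loop body, verbatim)
def cellVal (n x y : Int) : Int :=
  let r := min y (min (n - 1 - x) (x - y))
  let m := n - 3 * r
  let base := PySem.Int.floordiv (n * (n + 1)) 2 - PySem.Int.floordiv (m * (m + 1)) 2
  let off :=
    if y = r then x - 2 * r + 1
    else if x = n - 1 - r then m + (y - r)
    else 3 * m - 2 - (x - 2 * r)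
  base + off

def solution_06_alt (n : Int) : List Int :=
  (PySem.List.pyRange 0 n 1).foldl (fun out x =>
    (PySem.List.pyRange 0 (x + 1) 1).foldl (fun out y => out ++ [cellVal n x y]) out) []

-- ===== PRECONDITION & SPEC =====
def Spec_solution_06 (n : Int) (out : List Int) : Prop := out = solution_06_alt n
instance (n : Int) (out : List Int) : Decidable (Spec_solution_06 n out) := by unfold Spec_solution_06; infer_instance

-- ===== CLAIM (what is proved, stated in full; the proofs are below) =====
def Claim_equal_solution_06 : Prop := ∀ (n : Int), Dom_solution_06 n → Spec_solution_06 n (solution_06 n)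

-- ===== LEMMAS AND PROOFS =====

-- geometric description of the spiral: ring, edge, leg index and step index of a cell
def ringOf (n x y : Int) : Int := min y (min (n - 1 - x) (x - y))

def edgeOf (n x y : Int) : Int :=
  if y = ringOf n x y then 0 else if x = n - 1 - ringOf n x y then 1 else 2

def legIdxOf (n x y : Int) : Int := 3 * ringOf n x y + edgeOf n x y

def tIdxOf (n x y : Int) : Int :=
  if y = ringOf n x y then x - 2 * ringOf n x y
  else if x = n - 1 - ringOf n x y then y - ringOf n x y - 1
  else n - ringOf n x y - 2 - x

-- direction of leg k (A chooses it by i % 3 each step)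
def legDir (k : Nat) : Int × Int :=
  if k % 3 = 0 then (1, 0) else if k % 3 = 1 then (0, 1) else (-1, -1)

-- closed form for the walk position just before leg k starts
def legPos (n : Int) (k : Nat) : Int × Int :=
  let c : Int := (k / 3 : Nat)
  if k % 3 = 0 then (2 * c - 1, c)
  else if k % 3 = 1 then (n - 1 - c, c)
  else (n - 1 - c, n - 1 - 2 * c)

-- the s-counter value at the start of leg k
def sBase (n : Int) (k : Nat) : Int :=
  1 + PySem.Int.floordiv (n * (n + 1)) 2 - PySem.Int.floordiv ((n - k) * (n - k + 1)) 2

-- a(a+1) is even, so floor-halving it is exact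
lemma T2 (a : Int) : 2 * PySem.Int.floordiv (a * (a + 1)) 2 = a * (a + 1) := by
  obtain ⟨c, hc⟩ := Int.even_mul_succ_self a
  rw [PySem.Int.floordiv_eq_ediv_of_pos (by norm_num), hc]
  omega

-- consecutive triangular numbers differ by a
lemma Tdiff (a : Int) :
    PySem.Int.floordiv (a * (a + 1)) 2 - PySem.Int.floordiv ((a - 1) * a) 2 = a := by
  have h1 := T2 a
  have h2 := T2 (a - 1)
  have h3 : (a - 1) * (a - 1 + 1) = (a - 1) * a := by ring
  have h4 : a * (a + 1) = (a - 1) * a + 2 * a := by ring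
  rw [h3] at h2
  omega

lemma sBase_succ (n : Int) (k : Nat) : sBase n (k + 1) = sBase n k + (n - k) := by
  have h := Tdiff (n - k)
  have h3 : (n - k - 1) * (n - k) = (n - (k + 1 : Nat)) * (n - (k + 1 : Nat) + 1) := by
    push_cast; ring
  unfold sBase
  rw [← h3]
  omega

-- a full leg moves the position from legPos k to legPos (k+1)
lemma legPos_succ (n : Int) (N k : Nat) (hN : (N : Int) = n) (hk : k < N) :
    (legPos n k).1 + ((N - k : Nat) : Int) * (legDir k).1 = (legPos n (k + 1)).1 ∧
    (legPos n k).2 + ((N - k : Nat) : Int) * (legDir k).2 = (legPos n (k + 1)).2 := by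
  have h3 : k % 3 = 0 ∨ k % 3 = 1 ∨ k % 3 = 2 := by omega
  rcases h3 with h | h | h <;>
    · have h1 : (k + 1) % 3 = (k % 3 + 1) % 3 := by omega
      have h2 : (k + 1) / 3 = if k % 3 = 2 then k / 3 + 1 else k / 3 := by
        split <;> omega
      refine ⟨?_, ?_⟩ <;>
        · simp only [legPos, legDir, h, h1, h2]
          norm_num
          try omega

-- A's branch on i % 3 computes a step by legDir
lemma aInner_abs (k : Nat) (g : List (List Int)) (x y s : Int) :
    aInner (k : Int) (g, x, y, s) =
      (PySem.List.pySetD g (x + (legDir k).1)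
        (PySem.List.pySetD (PySem.List.pyGetD g (x + (legDir k).1) []) (y + (legDir k).2) s),
       x + (legDir k).1, y + (legDir k).2, s + 1) := by
  have hm : PySem.Int.mod ((k : Nat) : Int) 3 = ((k % 3 : Nat) : Int) := by
    exact_mod_cast PySem.Int.mod_natCast k 3
  have h3 : k % 3 = 0 ∨ k % 3 = 1 ∨ k % 3 = 2 := by omega
  rcases h3 with h | h | h <;>
    · simp only [aInner, legDir, h]
      rw [hm, h]
      simp only [Nat.cast_zero, Nat.cast_one, Nat.cast_ofNat]
      norm_num [sub_eq_add_neg]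

-- per-edge characterization of one write, pure Int arithmetic (c = ring, t = step)
lemma helper0 (n x y c t : Int) (hc : 0 ≤ c) (ht0 : 0 ≤ t) (ht : t < n - 3*c)
    (hx : x = 2*c + t) (hy : y = c) :
    0 ≤ y ∧ y ≤ x ∧ x < n ∧ legIdxOf n x y = 3*c ∧ tIdxOf n x y = t ∧
    cellVal n x y = 1 + PySem.Int.floordiv (n*(n+1)) 2
      - PySem.Int.floordiv ((n-3*c)*(n-3*c+1)) 2 + t := by
  have hr : min y (min (n - 1 - x) (x - y)) = c := by omega
  simp only [cellVal, legIdxOf, edgeOf, tIdxOf, ringOf, hr]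
  split_ifs <;> omega

lemma helper1 (n x y c t : Int) (hc : 0 ≤ c) (ht0 : 0 ≤ t) (ht : t < n - 3*c - 1)
    (hx : x = n - 1 - c) (hy : y = c + 1 + t) :
    0 ≤ y ∧ y ≤ x ∧ x < n ∧ legIdxOf n x y = 3*c + 1 ∧ tIdxOf n x y = t ∧
    cellVal n x y = 1 + PySem.Int.floordiv (n*(n+1)) 2
      - PySem.Int.floordiv ((n-3*c-1)*(n-3*c)) 2 + t := by
  have hr : min y (min (n - 1 - x) (x - y)) = c := by omega
  have hQ1 : PySem.Int.floordiv ((n - 3*c - 1) * (n - 3*c)) 2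
      = PySem.Int.floordiv ((n - 3*c) * (n - 3*c + 1)) 2 - (n - 3*c) := by
    have h1 := Tdiff (n - 3*c)
    omega
  simp only [cellVal, legIdxOf, edgeOf, tIdxOf, ringOf, hr]
  split_ifs <;> omega

lemma helper2 (n x y c t : Int) (hc : 0 ≤ c) (ht0 : 0 ≤ t) (ht : t < n - 3*c - 2)
    (hx : x = n - 2 - c - t) (hy : y = n - 2 - 2*c - t) :
    0 ≤ y ∧ y ≤ x ∧ x < n ∧ legIdxOf n x y = 3*c + 2 ∧ tIdxOf n x y = t ∧
    cellVal n x y = 1 + PySem.Int.floordiv (n*(n+1)) 2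
      - PySem.Int.floordiv ((n-3*c-2)*(n-3*c-1)) 2 + t := by
  have hr : min y (min (n - 1 - x) (x - y)) = c := by omega
  have hQ1 : PySem.Int.floordiv ((n - 3*c - 1) * (n - 3*c)) 2
      = PySem.Int.floordiv ((n - 3*c) * (n - 3*c + 1)) 2 - (n - 3*c) := by
    have h1 := Tdiff (n - 3*c); omega
  have hQ2 : PySem.Int.floordiv ((n - 3*c - 2) * (n - 3*c - 1)) 2
      = PySem.Int.floordiv ((n - 3*c - 1) * (n - 3*c)) 2 - (n - 3*c - 1) := by
    have h1 := Tdiff (n - 3*c - 1)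
    have e1 : (n - 3*c - 1) * (n - 3*c - 1 + 1) = (n - 3*c - 1) * (n - 3*c) := by ring
    have e2 : (n - 3*c - 1 - 1) * (n - 3*c - 1) = (n - 3*c - 2) * (n - 3*c - 1) := by ring
    rw [e1, e2] at h1
    omega
  simp only [cellVal, legIdxOf, edgeOf, tIdxOf, ringOf, hr]
  split_ifs <;> omega

-- the t-th write of leg k lands on a valid cell whose geometric data is (k, t)
-- and whose closed-form value is exactly the s-counter at that moment
lemma geom_char (n : Int) (k t : Nat) (hk : (k : Int) < n) (ht : (t : Int) < n - k) :
    0 ≤ (legPos n k).2 + ((t : Int) + 1) * (legDir k).2 ∧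
    (legPos n k).2 + ((t : Int) + 1) * (legDir k).2 ≤ (legPos n k).1 + ((t : Int) + 1) * (legDir k).1 ∧
    (legPos n k).1 + ((t : Int) + 1) * (legDir k).1 < n ∧
    legIdxOf n ((legPos n k).1 + ((t : Int) + 1) * (legDir k).1)
      ((legPos n k).2 + ((t : Int) + 1) * (legDir k).2) = k ∧
    tIdxOf n ((legPos n k).1 + ((t : Int) + 1) * (legDir k).1)
      ((legPos n k).2 + ((t : Int) + 1) * (legDir k).2) = t ∧
    cellVal n ((legPos n k).1 + ((t : Int) + 1) * (legDir k).1)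
      ((legPos n k).2 + ((t : Int) + 1) * (legDir k).2) = sBase n k + t := by
  have hc0 : (0 : Int) ≤ ((k / 3 : Nat) : Int) := Int.natCast_nonneg _
  have ht0 : (0 : Int) ≤ (t : Int) := Int.natCast_nonneg _
  have h3 : k % 3 = 0 ∨ k % 3 = 1 ∨ k % 3 = 2 := by omega
  rcases h3 with h | h | h
  · have hk3 : (k : Int) = 3 * ((k / 3 : Nat) : Int) := by
      exact_mod_cast congrArg (Nat.cast : Nat → Int) (by omega : k = 3 * (k / 3))
    have hx : (legPos n k).1 + ((t : Int) + 1) * (legDir k).1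
        = 2 * ((k / 3 : Nat) : Int) + (t : Int) := by
      simp [legPos, legDir, h]
      try ring
    have hy : (legPos n k).2 + ((t : Int) + 1) * (legDir k).2 = ((k / 3 : Nat) : Int) := by
      simp [legPos, legDir, h]
      try ring
    obtain ⟨a1, a2, a3, a4, a5, a6⟩ :=
      helper0 n _ _ ((k / 3 : Nat) : Int) (t : Int) hc0 ht0 (by omega) hx hy
    refine ⟨a1, a2, a3, by omega, a5, ?_⟩
    rw [a6]
    simp only [sBase]
    have e : (n - (k : Int)) * (n - (k : Int) + 1)
        = (n - 3 * ((k / 3 : Nat) : Int)) * (n - 3 * ((k / 3 : Nat) : Int) + 1) := by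
      rw [hk3]
    rw [e]
  · have hk3 : (k : Int) = 3 * ((k / 3 : Nat) : Int) + 1 := by
      exact_mod_cast congrArg (Nat.cast : Nat → Int) (by omega : k = 3 * (k / 3) + 1)
    have hx : (legPos n k).1 + ((t : Int) + 1) * (legDir k).1
        = n - 1 - ((k / 3 : Nat) : Int) := by
      simp [legPos, legDir, h]
    have hy : (legPos n k).2 + ((t : Int) + 1) * (legDir k).2
        = ((k / 3 : Nat) : Int) + 1 + (t : Int) := by
      simp [legPos, legDir, h]
      try ring
    obtain ⟨a1, a2, a3, a4, a5, a6⟩ :=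
      helper1 n _ _ ((k / 3 : Nat) : Int) (t : Int) hc0 ht0 (by omega) hx hy
    refine ⟨a1, a2, a3, by omega, a5, ?_⟩
    rw [a6]
    simp only [sBase]
    have e : (n - (k : Int)) * (n - (k : Int) + 1)
        = (n - 3 * ((k / 3 : Nat) : Int) - 1) * (n - 3 * ((k / 3 : Nat) : Int)) := by
      rw [hk3]; ring
    rw [e]
  · have hk3 : (k : Int) = 3 * ((k / 3 : Nat) : Int) + 2 := by
      exact_mod_cast congrArg (Nat.cast : Nat → Int) (by omega : k = 3 * (k / 3) + 2)
    have hx : (legPos n k).1 + ((t : Int) + 1) * (legDir k).1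
        = n - 2 - ((k / 3 : Nat) : Int) - (t : Int) := by
      simp [legPos, legDir, h]
      try ring
    have hy : (legPos n k).2 + ((t : Int) + 1) * (legDir k).2
        = n - 2 - 2 * ((k / 3 : Nat) : Int) - (t : Int) := by
      simp [legPos, legDir, h]
      try ring
    obtain ⟨a1, a2, a3, a4, a5, a6⟩ :=
      helper2 n _ _ ((k / 3 : Nat) : Int) (t : Int) hc0 ht0 (by omega) hx hy
    refine ⟨a1, a2, a3, by omega, a5, ?_⟩
    rw [a6]
    simp only [sBase]
    have e : (n - (k : Int)) * (n - (k : Int) + 1)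
        = (n - 3 * ((k / 3 : Nat) : Int) - 2) * (n - 3 * ((k / 3 : Nat) : Int) - 1) := by
      rw [hk3]; ring
    rw [e]

-- every valid cell's geometric data is in range
lemma geom_cover (n x y : Int) (h0 : 0 ≤ y) (h1 : y ≤ x) (h2 : x < n) :
    0 ≤ legIdxOf n x y ∧ legIdxOf n x y < n ∧
    0 ≤ tIdxOf n x y ∧ tIdxOf n x y < n - legIdxOf n x y := by
  simp only [legIdxOf, edgeOf, tIdxOf, ringOf]
  split_ifs <;> omega

-- (legIdxOf, tIdxOf) determines the cell
lemma geom_inj (n x y x' y' : Int) (h0 : 0 ≤ y) (h1 : y ≤ x) (h2 : x < n)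
    (h0' : 0 ≤ y') (h1' : y' ≤ x') (h2' : x' < n)
    (hL : legIdxOf n x y = legIdxOf n x' y') (hT : tIdxOf n x y = tIdxOf n x' y') :
    x = x' ∧ y = y' := by
  simp only [legIdxOf, edgeOf, tIdxOf, ringOf] at hL hT
  split_ifs at hL hT <;> omega

-- grid invariant: triangular shape, and each cell holds its closed-form value
-- exactly when its write (leg legIdxOf, step tIdxOf) has already happened
def GOK (n : Int) (k t : Int) (g : List (List Int)) : Prop :=
  g.length = n.toNat ∧
  (∀ (X : Nat) (hX : X < g.length), (g[X]).length = X + 1) ∧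
  (∀ (X Y : Nat), X < n.toNat → Y ≤ X →
    (g.getD X []).getD Y 0 = if legIdxOf n X Y < k ∨ (legIdxOf n X Y = k ∧ tIdxOf n X Y < t)
      then cellVal n X Y else 0)

-- reading through one set: in-range set shifts getD pointwise
lemma getD_set' {α : Type} (l : List α) (i j : Nat) (a d : α) (hi : i < l.length) :
    (l.set i a).getD j d = if i = j then a else l.getD j d := by
  simp [List.getD_eq_getElem?_getD, List.getElem?_set]
  split_ifs <;> simp_all

-- one write of A preserves the invariant, advancing the step counter
lemma step_ok (n : Int) (k t : Nat) (hk : (k : Int) < n) (ht : (t : Int) < n - k)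
    (g : List (List Int)) (hG : GOK n k t g) :
    ∃ g', aInner (k : Int)
        (g, (legPos n k).1 + (t : Int) * (legDir k).1,
            (legPos n k).2 + (t : Int) * (legDir k).2, sBase n k + t)
      = (g', (legPos n k).1 + ((t : Int) + 1) * (legDir k).1,
             (legPos n k).2 + ((t : Int) + 1) * (legDir k).2, sBase n k + t + 1)
      ∧ GOK n k (t + 1) g' := by
  obtain ⟨hlen, hrow, hcell⟩ := hG
  obtain ⟨hb0, hb1, hb2, hLeg, hTi, hVal⟩ := geom_char n k t hk ht
  have hstep1 : (legPos n k).1 + (t : Int) * (legDir k).1 + (legDir k).1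
      = (legPos n k).1 + ((t : Int) + 1) * (legDir k).1 := by ring
  have hstep2 : (legPos n k).2 + (t : Int) * (legDir k).2 + (legDir k).2
      = (legPos n k).2 + ((t : Int) + 1) * (legDir k).2 := by ring
  rw [aInner_abs, hstep1, hstep2]
  set x := (legPos n k).1 + ((t : Int) + 1) * (legDir k).1 with hxdef
  set y := (legPos n k).2 + ((t : Int) + 1) * (legDir k).2 with hydef
  have hx0 : (0 : Int) ≤ x := le_trans hb0 hb1
  have hxX : ((x.toNat : Nat) : Int) = x := Int.toNat_of_nonneg hx0
  have hyY : ((y.toNat : Nat) : Int) = y := Int.toNat_of_nonneg hb0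
  have hXlt : x.toNat < g.length := by omega
  have hrowX : (g[x.toNat]).length = x.toNat + 1 := hrow x.toNat hXlt
  have hYlt : y.toNat < (g[x.toNat]).length := by omega
  rw [PySem.List.pyGetD_eq_getElem g [] hx0 (by omega),
    PySem.List.pySetD_of_nonneg _ _ hb0, PySem.List.pySetD_of_nonneg _ _ hx0]
  refine ⟨g.set x.toNat ((g[x.toNat]).set y.toNat (sBase n k + t)), rfl, ?_, ?_, ?_⟩
  · simpa using hlen
  · intro X hX
    have hX' : X < g.length := by simpa using hX
    rw [List.getElem_set]
    split_ifs with hXx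
    · simp [← hXx, hrowX]
    · exact hrow X hX'
  · intro X Y hXn hYX
    have hXn' : (X : Int) < n := by omega
    have hYX' : (Y : Int) ≤ (X : Int) := by exact_mod_cast hYX
    have hY0 : (0 : Int) ≤ (Y : Int) := Int.natCast_nonneg _
    have hrowg : g.getD x.toNat [] = g[x.toNat] := List.getD_eq_getElem g [] hXlt
    rw [getD_set' g x.toNat X _ [] hXlt]
    by_cases hXx : x.toNat = X
    · rw [if_pos hXx]
      rw [getD_set' _ y.toNat Y _ 0 hYlt]
      by_cases hYy : y.toNat = Y
      · rw [if_pos hYy]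
        have hXc : (X : Int) = x := by omega
        have hYc : (Y : Int) = y := by omega
        rw [hXc, hYc, if_pos (Or.inr ⟨hLeg, by omega⟩), hVal]
      · rw [if_neg hYy]
        have hold := hcell X Y hXn hYX
        rw [← hrowg, hXx, hold]
        have hcond : (legIdxOf n X Y < (k : Int) ∨
              legIdxOf n X Y = (k : Int) ∧ tIdxOf n X Y < (t : Int) + 1) ↔
            (legIdxOf n X Y < (k : Int) ∨
              legIdxOf n X Y = (k : Int) ∧ tIdxOf n X Y < (t : Int)) := by
          constructor
          · rintro (h | ⟨he, hlt⟩)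
            · exact Or.inl h
            · by_cases hteq : tIdxOf n X Y = (t : Int)
              · exfalso
                have := geom_inj n X Y x y hY0 hYX' hXn' hb0 hb1 hb2
                  (by rw [hLeg, he]) (by rw [hTi, hteq])
                omega
              · exact Or.inr ⟨he, by omega⟩
          · rintro (h | ⟨he, hlt⟩)
            · exact Or.inl h
            · exact Or.inr ⟨he, by omega⟩
        rw [if_congr hcond rfl rfl]
    · rw [if_neg hXx]
      have hold := hcell X Y hXn hYX
      rw [hold]
      have hcond : (legIdxOf n X Y < (k : Int) ∨
            legIdxOf n X Y = (k : Int) ∧ tIdxOf n X Y < (t : Int) + 1) ↔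
          (legIdxOf n X Y < (k : Int) ∨
            legIdxOf n X Y = (k : Int) ∧ tIdxOf n X Y < (t : Int)) := by
        constructor
        · rintro (h | ⟨he, hlt⟩)
          · exact Or.inl h
          · by_cases hteq : tIdxOf n X Y = (t : Int)
            · exfalso
              have := geom_inj n X Y x y hY0 hYX' hXn' hb0 hb1 hb2
                (by rw [hLeg, he]) (by rw [hTi, hteq])
              omega
            · exact Or.inr ⟨he, by omega⟩
        · rintro (h | ⟨he, hlt⟩)
          · exact Or.inl h
          · exact Or.inr ⟨he, by omega⟩
      rw [if_congr hcond rfl rfl]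

-- a whole leg of c writes
lemma leg_ok (n : Int) (k : Nat) (hk : (k : Int) < n) (c : Nat) :
    ∀ (t : Nat), (t : Int) + c ≤ n - k → ∀ g, GOK n k t g →
    ∃ g', (aInner (k : Int))^[c]
        (g, (legPos n k).1 + (t : Int) * (legDir k).1,
            (legPos n k).2 + (t : Int) * (legDir k).2, sBase n k + t)
      = (g', (legPos n k).1 + ((t : Int) + c) * (legDir k).1,
             (legPos n k).2 + ((t : Int) + c) * (legDir k).2, sBase n k + (t + c))
      ∧ GOK n k ((t : Int) + c) g' := by
  induction c with
  | zero =>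
    intro t hle g hGt
    refine ⟨g, ?_, by simpa using hGt⟩
    simp only [Function.iterate_zero, id_eq, Prod.mk.injEq]
    push_cast
    exact ⟨trivial, by ring, by ring, by ring⟩
  | succ c ihc =>
    intro t hle g hGt
    have hle' : (t : Int) < n - k := by push_cast at hle; omega
    obtain ⟨g1, h1, hG1⟩ := step_ok n k t hk hle' g hGt
    have hc1 : ((t + 1 : Nat) : Int) = (t : Int) + 1 := by push_cast; ring
    obtain ⟨g', h2, hG2⟩ := ihc (t + 1) (by push_cast at hle ⊢; omega) g1
      (by rw [hc1]; exact hG1)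
    rw [hc1] at h2
    rw [show sBase n k + (t : Int) + 1 = sBase n k + ((t : Int) + 1) from by ring] at h1
    rw [Function.iterate_succ_apply, h1, h2]
    refine ⟨g', ?_, ?_⟩
    · simp only [Prod.mk.injEq]
      push_cast
      exact ⟨trivial, by ring, by ring, by ring⟩
    · have he : ((t : Int) + 1) + (c : Int) = (t : Int) + ((c + 1 : Nat) : Int) := by
        push_cast; ring
      rw [hc1] at hG2
      rwa [he] at hG2

-- after the last write of leg k the invariant is the one for leg k+1
lemma GOK_shift (n : Int) (k : Nat) (g : List (List Int)) (hG : GOK n k (n - k) g) :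
    GOK n (k + 1) 0 g := by
  obtain ⟨hlen, hrow, hcell⟩ := hG
  refine ⟨hlen, hrow, ?_⟩
  intro X Y hXn hYX
  have hXn' : (X : Int) < n := by omega
  have hYX' : (Y : Int) ≤ (X : Int) := by exact_mod_cast hYX
  have cov := geom_cover n X Y (Int.natCast_nonneg _) hYX' hXn'
  have hold := hcell X Y hXn hYX
  split_ifs at hold ⊢ with h1 h2 h3
  · exact hold
  · exfalso; push_cast at h1 h2; omega
  · exfalso; push_cast at h1 h3; omega
  · exact hold

-- a fold whose body ignores the list element is an iterate
lemma foldl_const_iterate {α β : Type} (l : List α) (f : β → β) (b : β) :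
    l.foldl (fun st _ => f st) b = f^[l.length] b := by
  induction l generalizing b with
  | nil => rfl
  | cons a l ih => simp [List.foldl_cons, Function.iterate_succ_apply, ih]

-- simulation over the first m legs
lemma outer_ok (n : Int) (hn : 0 ≤ n) (m : Nat) (hm : m ≤ n.toNat) :
    ∃ g, (List.range m).foldl (fun st (k : Nat) => (aInner (k : Int))^[n.toNat - k] st)
        (((List.range n.toNat).map (fun k => List.replicate (k + 1) (0 : Int))), -1, 0, 1)
      = (g, (legPos n m).1, (legPos n m).2, sBase n m)
      ∧ GOK n m 0 g := by
  have hNn : ((n.toNat : Nat) : Int) = n := Int.toNat_of_nonneg hn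
  induction m with
  | zero =>
    refine ⟨(List.range n.toNat).map (fun k => List.replicate (k + 1) (0 : Int)), ?_, ?_, ?_, ?_⟩
    · simp only [List.range_zero, List.foldl_nil, Prod.mk.injEq]
      refine ⟨trivial, ?_, ?_, ?_⟩
      · norm_num [legPos]
      · norm_num [legPos]
      · simp only [sBase, Nat.cast_zero, sub_zero]
        omega
    · simp
    · intro X hX
      simp at hX ⊢
    · intro X Y hXn hYX
      have hYX' : (Y : Int) ≤ (X : Int) := by exact_mod_cast hYX
      have cov := geom_cover n X Y (Int.natCast_nonneg _) hYX' (by omega)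
      rw [if_neg (by omega)]
      have hXlt : X < ((List.range n.toNat).map
          (fun k => List.replicate (k + 1) (0 : Int))).length := by simpa using hXn
      rw [List.getD_eq_getElem _ [] hXlt]
      simp
  | succ m ihm =>
    obtain ⟨g, hfold, hG⟩ := ihm (by omega)
    have hmlt : m < n.toNat := by omega
    have hkn : ((m : Nat) : Int) < n := by omega
    obtain ⟨g', hit, hG'⟩ := leg_ok n m hkn (n.toNat - m) 0 (by push_cast; omega) g
      (by simpa using hG)
    rw [List.range_succ, List.foldl_append, List.foldl_cons, List.foldl_nil, hfold]
    have hstart : ((g, (legPos n m).1, (legPos n m).2, sBase n m) :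
        List (List Int) × Int × Int × Int)
        = (g, (legPos n m).1 + ((0 : Nat) : Int) * (legDir m).1,
            (legPos n m).2 + ((0 : Nat) : Int) * (legDir m).2, sBase n m + ((0 : Nat) : Int)) := by
      simp
    rw [hstart, hit]
    have hpos := legPos_succ n n.toNat m hNn hmlt
    have hcast : ((0 : Nat) : Int) + ((n.toNat - m : Nat) : Int) = n - (m : Int) := by
      push_cast; omega
    refine ⟨g', ?_, ?_⟩
    · simp only [Prod.mk.injEq]
      refine ⟨trivial, ?_, ?_, ?_⟩
      · rw [show ((0 : Nat) : Int) + ((n.toNat - m : Nat) : Int) = ((n.toNat - m : Nat) : Int) by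
          push_cast; ring]
        exact hpos.1
      · rw [show ((0 : Nat) : Int) + ((n.toNat - m : Nat) : Int) = ((n.toNat - m : Nat) : Int) by
          push_cast; ring]
        exact hpos.2
      · rw [sBase_succ]
        push_cast
        omega
    · rw [hcast] at hG'
      exact GOK_shift n m g' hG'

-- A's fold reshaped: outer range over leg numbers, inner fold an iterate
lemma portA_eq (n : Int) :
    solution_06 n =
      ((List.range n.toNat).foldl (fun st (k : Nat) => (aInner (k : Int))^[n.toNat - k] st)
        (((List.range n.toNat).map (fun k => List.replicate (k + 1) (0 : Int))), -1, 0, 1)).1.flatten := by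
  have hinit : (PySem.List.pyRange 1 (n + 1) 1).map (fun i => List.replicate i.toNat (0 : Int))
      = (List.range n.toNat).map (fun k => List.replicate (k + 1) (0 : Int)) := by
    rw [PySem.List.pyRange_one, List.map_map]
    have he : ((n + 1) - 1).toNat = n.toNat := by omega
    rw [he]
    refine List.map_congr_left (fun k _ => ?_)
    simp only [Function.comp]
    congr 1
    omega
  have hfold : ∀ (st : List (List Int) × Int × Int × Int),
      (PySem.List.pyRange 0 n 1).foldl
          (fun st i => (PySem.List.pyRange i n 1).foldl (fun st _j => aInner i st) st) st
        = (List.range n.toNat).foldl (fun st (k : Nat) => (aInner (k : Int))^[n.toNat - k] st) st := by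
    intro st
    rw [PySem.List.pyRange_one 0 n, List.foldl_map]
    simp only [sub_zero]
    refine PySem.List.foldl_congr_mem _ _ _ _ ?_
    intro acc k hk
    simp only [zero_add]
    rw [foldl_const_iterate, PySem.List.length_pyRange_one]
    congr 1
    omega
  show ((PySem.List.pyRange 0 n 1).foldl
      (fun st i => (PySem.List.pyRange i n 1).foldl (fun st _j => aInner i st) st)
      ((PySem.List.pyRange 1 (n + 1) 1).map (fun i => List.replicate i.toNat (0 : Int)), -1, 0, 1)).1.foldl
        (fun r a => r ++ a) [] = _
  rw [hinit, hfold, PySem.List.foldl_append_eq_flatten, List.nil_append]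

-- B's nested appends reshaped into a flatMap of row maps
lemma portB_eq (n : Int) :
    solution_06_alt n =
      (List.range n.toNat).flatMap
        (fun X => (List.range (X + 1)).map (fun (Y : Nat) => cellVal n (X : Int) (Y : Int))) := by
  show (PySem.List.pyRange 0 n 1).foldl (fun out x =>
      (PySem.List.pyRange 0 (x + 1) 1).foldl (fun out y => out ++ [cellVal n x y]) out) [] = _
  simp only [PySem.List.foldl_append_singleton_eq_map]
  rw [PySem.List.foldl_append_eq_flatMap, List.nil_append, PySem.List.pyRange_one 0 n,
    List.flatMap_map]
  simp only [sub_zero, zero_add]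
  refine List.flatMap_congr (fun X hX => ?_)
  rw [PySem.List.pyRange_one 0 ((X : Int) + 1), List.map_map]
  simp only [sub_zero, zero_add]
  have he : ((X : Int) + 1).toNat = X + 1 := by omega
  rw [he]
  simp [Function.comp]

-- a fully written grid IS the row-by-row table of closed-form values
lemma final_flatten (n : Int) (hn : 0 ≤ n) (g : List (List Int)) (hG : GOK n n.toNat 0 g) :
    g.flatten = (List.range n.toNat).flatMap
      (fun X => (List.range (X + 1)).map (fun (Y : Nat) => cellVal n (X : Int) (Y : Int))) := by
  obtain ⟨hlen, hrow, hcell⟩ := hG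
  have hNn : ((n.toNat : Nat) : Int) = n := Int.toNat_of_nonneg hn
  have hg : g = (List.range n.toNat).map
      (fun X => (List.range (X + 1)).map (fun (Y : Nat) => cellVal n (X : Int) (Y : Int))) := by
    apply List.ext_getElem (by simp [hlen])
    intro X h1 h2
    have hX' : X < n.toNat := by simpa using h2
    apply List.ext_getElem (by simp [hrow X h1])
    intro Y hY1 hY2
    simp only [List.getElem_map, List.getElem_range]
    have hX'' : X < n.toNat := by simpa using h2
    have hYX : Y ≤ X := by
      have := hY1
      rw [hrow X h1] at this
      omega
    have hYX' : (Y : Int) ≤ (X : Int) := by exact_mod_cast hYX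
    have cov := geom_cover n X Y (Int.natCast_nonneg _) hYX' (by omega)
    have hcv := hcell X Y hX'' hYX
    rw [List.getD_eq_getElem g [] h1, List.getD_eq_getElem _ 0 hY1] at hcv
    rw [hcv, if_pos (Or.inl (by omega))]
  rw [hg, List.flatMap_def]

-- ===== VERDICT (by name: the statement is the Claim_ definition above) =====
theorem solution_06_spec : Claim_equal_solution_06 := by
  intro n _
  unfold Spec_solution_06
  rw [portA_eq, portB_eq]
  by_cases hn : 0 ≤ n
  · obtain ⟨g, hA, hG⟩ := outer_ok n hn n.toNat le_rfl
    rw [hA]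
    exact final_flatten n hn g hG
  · have h0 : n.toNat = 0 := by omega
    simp [h0]
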